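-- pv_equiv track=rewrite | github.com/AFKMartin/LeetCode | 1 - 250/241. Different Ways to Add Parentheses.py | diffWaysToCompute
-- ===== SOURCE A (Python) =====
-- expression = "2-1-1"
--
-- def diffWaysToCompute(expression: str):
--     m = {}
--
--     # if we've already computed results for this substring, return cached version
--     def ways(exp):
--         if exp in m:
--             return m[exp]
--
--         res = []
--         if exp.isdigit(): # if exp is a whole number, convert to int and return it
--             res.append(int(exp))
--         else:
--             for i, char in enumerate(exp):
--                 if char in "+-*/": # if the character is an operator, use it as a split point
--                     left = ways(exp[:i]) # everything BEFORE the operator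
--                     right = ways(exp[i+1:]) # everything AFTER the operator
--
--                     for l in left: # combine every left result with every right result using the operator
--                         for r in right:
--                             if char == "+":
--                                 res.append(l + r)
--
--                             elif char == "-":
--                                 res.append(l - r)
--
--                             elif char == "*":
--                                 res.append(l * r)
--
--                             # elif char == "/":
--                             #     res.append(l // r) # just realized this is not needed
--         m[exp] = res
--         return res
--
--     return ways(expression)
-- ===== SOURCE B (Python) =====
-- def diffWaysToCompute(expression: str):
--     # Tokenize once into number segments and the operators between them,
--     # then recurse over segment index ranges instead of substrings.
--     segs = []
--     ops = []
--     cur = ""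
--     for ch in expression:
--         if ch in "+-*/":
--             segs.append(cur)
--             ops.append(ch)
--             cur = ""
--         else:
--             cur += ch
--     segs.append(cur)
--
--     def solve(lo, hi):
--         # all results of the sub-expression spanning segments lo..hi (inclusive)
--         if lo == hi:
--             s = segs[lo]
--             return [int(s)] if s.isdigit() else []
--         res = []
--         for j in range(lo, hi):
--             left = solve(lo, j)
--             right = solve(j + 1, hi)
--             for l in left:
--                 for r in right:
--                     if ops[j] == "+":
--                         res.append(l + r)
--                     elif ops[j] == "-":
--                         res.append(l - r)
--                     elif ops[j] == "*":
--                         res.append(l * r)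
--         return res
--
--     return solve(0, len(ops))
-- ===== Notes on version B (the rewrite author's own statement) =====
-- stated objective: alternative
-- what changed: B tokenizes the expression once into number segments and the operators between them and recurses over segment index ranges (no cache), instead of A's character-scanning recursion on substrings with a substring-keyed memo dict.
import Mathlib
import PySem

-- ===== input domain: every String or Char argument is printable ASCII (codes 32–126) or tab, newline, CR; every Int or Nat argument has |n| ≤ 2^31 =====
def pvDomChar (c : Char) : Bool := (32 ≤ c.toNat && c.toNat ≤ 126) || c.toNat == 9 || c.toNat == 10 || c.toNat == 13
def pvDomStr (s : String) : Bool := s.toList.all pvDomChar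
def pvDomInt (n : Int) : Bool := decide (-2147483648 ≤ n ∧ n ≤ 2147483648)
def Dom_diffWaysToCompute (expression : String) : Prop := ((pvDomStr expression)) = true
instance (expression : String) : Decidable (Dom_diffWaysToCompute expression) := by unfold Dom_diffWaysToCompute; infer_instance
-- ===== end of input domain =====

-- B tokenizes the expression once into number segments and the operators between them and
-- recurses over segment index ranges (no cache), instead of A's character-scanning recursion
-- on substrings with a substring-keyed memo dict (objective: alternative decomposition).

-- ===== PORT A =====

-- char in "+-*/"
def pvOp (c : Char) : Bool := c == '+' || c == '-' || c == '*' || c == '/'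

-- A's inner double loop "for l in left: for r in right: if/elif …: res.append(…)"
def pvCombA (c : Char) (left right : List Int) : List Int :=
  left.flatMap (fun l => right.flatMap (fun r =>
    if c == '+' then [l + r] else if c == '-' then [l - r] else if c == '*' then [l * r] else []))

-- ways(exp) with the memo dict m threaded through; fuel is structural only (the wrapper
-- passes length+1, and every recursive call is on a strictly shorter slice).
def pvWaysA : Nat → List Char → PySem.Dict (List Char) (List Int) →
    List Int × PySem.Dict (List Char) (List Int)
  | 0, _, m => ([], m)
  | f+1, exp, m =>
    match m.get? exp with
    | some v => (v, m)                                    -- if exp in m: return m[exp]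
    | none =>
      let st :=
        if PySem.Chars.strIsdigit exp then                -- if exp.isdigit(): res.append(int(exp))
          ((PySem.Int.ofChars? exp).elim [] (fun v => [v]), m)   -- (isdigit ⇒ int() succeeds)
        else
          (PySem.List.enumerate exp).foldl                -- for i, char in enumerate(exp):
            (fun st p =>
              if pvOp p.2 then
                let l := pvWaysA f (PySem.List.slice exp none (some p.1)) st.2        -- ways(exp[:i])
                let r := pvWaysA f (PySem.List.slice exp (some (p.1 + 1)) none) l.2   -- ways(exp[i+1:])
                (st.1 ++ pvCombA p.2 l.1 r.1, r.2)
              else st)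
            ([], m)
      (st.1, st.2.insert exp st.1)                        -- m[exp] = res; return res

def diffWaysToCompute (expression : String) : List Int :=
  (pvWaysA (expression.toList.length + 1) expression.toList PySem.Dict.empty).1

-- ===== PORT B =====

-- Source B's combine branches "if op == '+' … elif op == '-' … elif op == '*'"
def pvCombB (c : Char) (left right : List Int) : List Int :=
  left.flatMap (fun l => right.flatMap (fun r =>
    if c == '+' then [l + r] else if c == '-' then [l - r] else if c == '*' then [l * r] else []))

-- the tokenizing loop of Source B: (segs, ops, cur) accumulator, final `segs.append(cur)`
def pvTok (exp : List Char) : List (List Char) × List Char :=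
  let st := exp.foldl
    (fun (st : List (List Char) × List Char × List Char) c =>
      if pvOp c then (st.1 ++ [st.2.2], st.2.1 ++ [c], [])
      else (st.1, st.2.1, st.2.2 ++ [c]))
    ([], [], [])
  (st.1 ++ [st.2.2], st.2.1)

-- solve(lo, hi) over segment index ranges; fuel is structural only (wrapper passes
-- ops.length+1 > hi-lo for every reachable call).
def pvSolveB (segs : List (List Char)) (ops : List Char) : Nat → Nat → Nat → List Int
  | 0, _, _ => []
  | f+1, lo, hi =>
    if lo = hi then
      let s := segs.getD lo []
      if PySem.Chars.strIsdigit s then (PySem.Int.ofChars? s).elim [] (fun v => [v]) else []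
    else
      (List.range' lo (hi - lo)).flatMap (fun j =>
        pvCombB (ops.getD j ' ') (pvSolveB segs ops f lo j) (pvSolveB segs ops f (j+1) hi))

def diffWaysToCompute_alt (expression : String) : List Int :=
  let t := pvTok expression.toList
  pvSolveB t.1 t.2 (t.2.length + 1) 0 t.2.length

-- ===== PRECONDITION & SPEC =====
def Spec_diffWaysToCompute (expression : String) (out : List Int) : Prop := out = diffWaysToCompute_alt expression
instance (expression : String) (out : List Int) : Decidable (Spec_diffWaysToCompute expression out) := by unfold Spec_diffWaysToCompute; infer_instance

-- ===== CLAIM (what is proved, stated in full; the proofs are below) =====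
def Claim_equal_diffWaysToCompute : Prop := ∀ (expression : String), Dom_diffWaysToCompute expression → Spec_diffWaysToCompute expression (diffWaysToCompute expression)

-- ===== LEMMAS AND PROOFS =====

-- pure (memo-free) version of A's recursion, with the same fuel discipline
def pvW : Nat → List Char → List Int
  | 0, _ => []
  | f+1, exp =>
    if PySem.Chars.strIsdigit exp then (PySem.Int.ofChars? exp).elim [] (fun v => [v])
    else
      (PySem.List.enumerate exp).flatMap (fun p =>
        if pvOp p.2 then
          pvCombA p.2 (pvW f (PySem.List.slice exp none (some p.1)))
                      (pvW f (PySem.List.slice exp (some (p.1 + 1)) none))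
        else [])

def pvWW (exp : List Char) : List Int := pvW (exp.length + 1) exp

-- A's scanning loop, rephrased with an explicit already-scanned prefix
def pvL : List Char → List Char → List Int
  | _pre, [] => []
  | pre, c :: b =>
    (if pvOp c then pvCombA c (pvWW pre) (pvWW b) else []) ++ pvL (pre ++ [c]) b

-- recursive tokenizer: first segment plus (operator, following segment) pairs
def pvTokP : List Char → List Char × List (Char × List Char)
  | [] => ([], [])
  | c :: rest =>
    let t := pvTokP rest
    if pvOp c then ([], (c, t.1) :: t.2) else (c :: t.1, t.2)

-- the sub-expression spanned by segments lo..hi (inclusive), as a char list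
def pvTail (segs : List (List Char)) (ops : List Char) (lo hi : Nat) : List Char :=
  (List.range' lo (hi - lo)).flatMap (fun j => ops.getD j ' ' :: segs.getD (j+1) [])

def pvJoin (segs : List (List Char)) (ops : List Char) (lo hi : Nat) : List Char :=
  segs.getD lo [] ++ pvTail segs ops lo hi

theorem pvW_mono : ∀ f g exp, exp.length < f → exp.length < g → pvW f exp = pvW g exp := by
  intro f
  induction f with
  | zero => intro g exp h _; exact absurd h (by omega)
  | succ f ih =>
    intro g exp hf hg
    cases g with
    | zero => exact absurd hg (by omega)
    | succ g =>
      simp only [pvW]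
      split
      · rfl
      · refine List.flatMap_congr ?_
        rintro ⟨i, c⟩ hm
        rw [PySem.List.mem_enumerate_iff] at hm
        obtain ⟨k, hk, hpe⟩ := hm
        cases hpe
        simp only [zero_add]
        have e2 : ((k : Int) + 1) = (((k+1 : Nat)) : Int) := by push_cast; ring
        rw [e2, PySem.List.slice_to_natCast, PySem.List.slice_from_natCast]
        by_cases hop : pvOp exp[k]
        · simp only [hop, if_true]
          rw [ih g (exp.take k) (by simp [List.length_take]; omega) (by simp [List.length_take]; omega),
              ih g (exp.drop (k+1)) (by simp [List.length_drop]; omega) (by simp [List.length_drop]; omega)]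
        · simp only [hop]
          rfl

theorem pvWW_unfold (exp : List Char) :
    pvWW exp =
      if PySem.Chars.strIsdigit exp then (PySem.Int.ofChars? exp).elim [] (fun v => [v])
      else
        (PySem.List.enumerate exp).flatMap (fun p =>
          if pvOp p.2 then
            pvCombA p.2 (pvWW (PySem.List.slice exp none (some p.1)))
                        (pvWW (PySem.List.slice exp (some (p.1 + 1)) none))
          else []) := by
  rw [pvWW]
  rw [pvW]
  split
  · rfl
  · refine List.flatMap_congr ?_
    rintro ⟨i, c⟩ hm
    rw [PySem.List.mem_enumerate_iff] at hm
    obtain ⟨k, hk, hpe⟩ := hm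
    cases hpe
    simp only [zero_add]
    have e2 : ((k : Int) + 1) = (((k+1 : Nat)) : Int) := by push_cast; ring
    rw [e2, PySem.List.slice_to_natCast, PySem.List.slice_from_natCast]
    by_cases hop : pvOp exp[k]
    · simp only [hop, if_true]
      rw [pvW_mono exp.length ((exp.take k).length + 1) (exp.take k)
            (by simp [List.length_take]; omega) (by omega),
          pvW_mono exp.length ((exp.drop (k+1)).length + 1) (exp.drop (k+1))
            (by simp [List.length_drop]; omega) (by omega)]
      rfl
    · simp only [hop]
      rfl

theorem pvL_eq : ∀ (b pre : List Char),
    (PySem.List.enumerate b (pre.length : Int)).flatMap (fun p =>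
      if pvOp p.2 then
        pvCombA p.2 (pvWW (PySem.List.slice (pre ++ b) none (some p.1)))
                    (pvWW (PySem.List.slice (pre ++ b) (some (p.1 + 1)) none))
      else []) = pvL pre b := by
  intro b
  induction b with
  | nil => intro pre; simp [pvL, PySem.List.enumerate_nil]
  | cons c b ih =>
    intro pre
    have h1 : PySem.List.slice (pre ++ c :: b) none (some ((pre.length : Nat) : Int)) = pre := by
      rw [PySem.List.slice_to_natCast]; exact List.take_left
    have e2 : ((pre.length : Int) + 1) = (((pre.length + 1 : Nat)) : Int) := by push_cast; ring
    have h2 : PySem.List.slice (pre ++ c :: b) (some ((pre.length : Int) + 1)) none = b := by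
      rw [e2, PySem.List.slice_from_natCast, List.append_cons]
      have hl : pre.length + 1 = (pre ++ [c]).length := by simp
      rw [hl, List.drop_left]
    have h3 : ((pre.length : Int) + 1) = (((pre ++ [c]).length : Nat) : Int) := by
      rw [List.length_append, List.length_singleton]; push_cast; ring
    rw [PySem.List.enumerate_cons, List.flatMap_cons, pvL]
    simp only [h1, h2]
    rw [h3, List.append_cons pre c b, ih (pre ++ [c])]

theorem pvWW_eq_pvL (exp : List Char) (h : PySem.Chars.strIsdigit exp = false) :
    pvWW exp = pvL [] exp := by
  rw [pvWW_unfold, if_neg (by simp [h])]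
  have := pvL_eq exp []
  simpa using this

theorem pvL_append : ∀ (a pre b : List Char), (∀ c ∈ a, pvOp c = false) →
    pvL pre (a ++ b) = pvL (pre ++ a) b := by
  intro a
  induction a with
  | nil => intro pre b _; simp
  | cons c a ih =>
    intro pre b h
    have hc : pvOp c = false := h c (by simp)
    rw [List.cons_append, pvL, hc]
    simp only [Bool.false_eq_true, if_false, List.nil_append]
    rw [ih (pre ++ [c]) b (fun d hd => h d (by simp [hd]))]
    simp [List.append_assoc]

theorem pvL_nil_of_no_op (a pre : List Char) (h : ∀ c ∈ a, pvOp c = false) :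
    pvL pre a = [] := by
  have := pvL_append a pre [] h
  rw [List.append_nil] at this
  rw [this, pvL]

theorem isdigit_false_of_op (cs : List Char) (c : Char) (hc : c ∈ cs) (hop : pvOp c = true) :
    PySem.Chars.strIsdigit cs = false := by
  have hd : PySem.Chars.isdigit c = false := by
    revert hop
    simp only [pvOp, Bool.or_eq_true, beq_iff_eq]
    rintro (((rfl | rfl) | rfl) | rfl) <;> decide
  cases hsd : PySem.Chars.strIsdigit cs with
  | false => rfl
  | true =>
    exfalso
    rw [PySem.Chars.strIsdigit, Bool.and_eq_true, List.all_eq_true] at hsd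
    have := hsd.2 c hc
    rw [hd] at this
    exact absurd this (by decide)

-- invariant of the memo dict: every stored value is the pure result
def pvInv (m : PySem.Dict (List Char) (List Int)) : Prop :=
  ∀ k v, m.get? k = some v → v = pvWW k

def pvStepA (f : Nat) (exp : List Char)
    (st : List Int × PySem.Dict (List Char) (List Int)) (p : Int × Char) :
    List Int × PySem.Dict (List Char) (List Int) :=
  if pvOp p.2 then
    let l := pvWaysA f (PySem.List.slice exp none (some p.1)) st.2
    let r := pvWaysA f (PySem.List.slice exp (some (p.1 + 1)) none) l.2
    (st.1 ++ pvCombA p.2 l.1 r.1, r.2)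
  else st

theorem pvWaysA_correct : ∀ f exp m, exp.length < f → pvInv m →
    (pvWaysA f exp m).1 = pvWW exp ∧ pvInv (pvWaysA f exp m).2 := by
  intro f
  induction f with
  | zero => intro exp m h _; exact absurd h (by omega)
  | succ f ih =>
    intro exp m hf hInv
    simp only [pvWaysA]
    cases hget : m.get? exp with
    | some v => exact ⟨hInv _ _ hget, hInv⟩
    | none =>
      by_cases hdig : PySem.Chars.strIsdigit exp
      · simp only [hdig, if_true]
        constructor
        · rw [pvWW_unfold, if_pos hdig]
        · intro k v hk
          rw [PySem.Dict.get?_insert] at hk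
          split_ifs at hk with he
          · subst he
            injection hk with hv
            rw [← hv, pvWW_unfold, if_pos hdig]
          · exact hInv _ _ hk
      · have key : ∀ (l : List (Int × Char)), (∀ p ∈ l, ∃ k : Nat, k < exp.length ∧ p.1 = (k : Int)) →
            ∀ (acc : List Int) (m' : PySem.Dict (List Char) (List Int)), pvInv m' →
            (List.foldl (pvStepA f exp) (acc, m') l).1 =
              acc ++ l.flatMap (fun p =>
                if pvOp p.2 then
                  pvCombA p.2 (pvWW (PySem.List.slice exp none (some p.1)))
                              (pvWW (PySem.List.slice exp (some (p.1 + 1)) none))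
                else []) ∧
            pvInv (List.foldl (pvStepA f exp) (acc, m') l).2 := by
          intro l
          induction l with
          | nil => intro _ acc m' hm'; exact ⟨by simp, hm'⟩
          | cons p l ihl =>
            rintro hl acc m' hm'
            obtain ⟨k, hk, hpk⟩ := hl p (by simp)
            rw [List.foldl_cons, List.flatMap_cons]
            by_cases hop : pvOp p.2
            · have hlen1 : (PySem.List.slice exp none (some p.1)).length < f := by
                rw [hpk, PySem.List.slice_to_natCast]
                simp [List.length_take]; omega
              have h1 := ih (PySem.List.slice exp none (some p.1)) m' hlen1 hm'
              have hlen2 : (PySem.List.slice exp (some (p.1 + 1)) none).length < f := by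
                have e2 : (p.1 + 1) = (((k + 1 : Nat)) : Int) := by rw [hpk]; push_cast; ring
                rw [e2, PySem.List.slice_from_natCast]
                simp [List.length_drop]; omega
              have h2 := ih (PySem.List.slice exp (some (p.1 + 1)) none) _ hlen2 h1.2
              have hstep : pvStepA f exp (acc, m') p =
                  (acc ++ pvCombA p.2 (pvWaysA f (PySem.List.slice exp none (some p.1)) m').1
                    (pvWaysA f (PySem.List.slice exp (some (p.1 + 1)) none)
                      (pvWaysA f (PySem.List.slice exp none (some p.1)) m').2).1,
                   (pvWaysA f (PySem.List.slice exp (some (p.1 + 1)) none)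
                      (pvWaysA f (PySem.List.slice exp none (some p.1)) m').2).2) := by
                simp only [pvStepA, hop, if_true]
              rw [hstep]
              have hrec := ihl (fun q hq => hl q (by simp [hq]))
                (acc ++ pvCombA p.2 (pvWaysA f (PySem.List.slice exp none (some p.1)) m').1
                  (pvWaysA f (PySem.List.slice exp (some (p.1 + 1)) none)
                    (pvWaysA f (PySem.List.slice exp none (some p.1)) m').2).1)
                (pvWaysA f (PySem.List.slice exp (some (p.1 + 1)) none)
                  (pvWaysA f (PySem.List.slice exp none (some p.1)) m').2).2
                h2.2
              refine ⟨?_, hrec.2⟩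
              rw [hrec.1, h1.1, h2.1]
              simp [hop, List.append_assoc]
            · have hstep : pvStepA f exp (acc, m') p = (acc, m') := by
                simp [pvStepA, hop]
              rw [hstep]
              have hrec := ihl (fun q hq => hl q (by simp [hq])) acc m' hm'
              refine ⟨?_, hrec.2⟩
              rw [hrec.1]
              simp [hop]
        have hl : ∀ p ∈ PySem.List.enumerate exp, ∃ k : Nat, k < exp.length ∧ p.1 = (k : Int) := by
          intro p hp
          rw [PySem.List.mem_enumerate_iff] at hp
          obtain ⟨k, hk, hpe⟩ := hp
          exact ⟨k, hk, by rw [hpe]; simp⟩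
        obtain ⟨hres, hinv'⟩ := key (PySem.List.enumerate exp) hl [] m hInv
        have hval : (List.foldl (pvStepA f exp) ([], m) (PySem.List.enumerate exp)).1 = pvWW exp := by
          rw [hres, pvWW_unfold, if_neg hdig]
          simp
        have hdig' : PySem.Chars.strIsdigit exp = false := by simpa using hdig
        simp only [hdig', Bool.false_eq_true, if_false]
        constructor
        · exact hval
        · intro k v hk
          have hk' : (PySem.Dict.insert
              (List.foldl (pvStepA f exp) ([], m) (PySem.List.enumerate exp)).2 exp
              (List.foldl (pvStepA f exp) ([], m) (PySem.List.enumerate exp)).1).get? k = some v := hk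
          rw [PySem.Dict.get?_insert] at hk'
          split_ifs at hk' with he
          · subst he
            injection hk' with hv
            rw [← hv, hval]
          · exact hinv' _ _ hk'

-- tokenizer facts
theorem pvTok_fold : ∀ (exp : List Char) (segs0 : List (List Char)) (ops0 cur0 : List Char),
    ((exp.foldl (fun (st : List (List Char) × List Char × List Char) c =>
        if pvOp c then (st.1 ++ [st.2.2], st.2.1 ++ [c], [])
        else (st.1, st.2.1, st.2.2 ++ [c])) (segs0, ops0, cur0)).1 ++
      [(exp.foldl (fun (st : List (List Char) × List Char × List Char) c =>
        if pvOp c then (st.1 ++ [st.2.2], st.2.1 ++ [c], [])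
        else (st.1, st.2.1, st.2.2 ++ [c])) (segs0, ops0, cur0)).2.2],
     (exp.foldl (fun (st : List (List Char) × List Char × List Char) c =>
        if pvOp c then (st.1 ++ [st.2.2], st.2.1 ++ [c], [])
        else (st.1, st.2.1, st.2.2 ++ [c])) (segs0, ops0, cur0)).2.1) =
    (segs0 ++ (cur0 ++ (pvTokP exp).1) :: (pvTokP exp).2.map (·.2),
     ops0 ++ (pvTokP exp).2.map (·.1)) := by
  intro exp
  induction exp with
  | nil => intro segs0 ops0 cur0; simp [pvTokP]
  | cons c rest ih =>
    intro segs0 ops0 cur0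
    simp only [List.foldl_cons, pvTokP]
    by_cases hc : pvOp c
    · simp only [hc, if_true]
      rw [ih (segs0 ++ [cur0]) (ops0 ++ [c]) []]
      simp [List.append_assoc]
    · simp only [hc, Bool.false_eq_true, if_false]
      rw [ih segs0 ops0 (cur0 ++ [c])]
      simp [List.append_assoc]

theorem pvTok_eq (exp : List Char) :
    pvTok exp = ((pvTokP exp).1 :: (pvTokP exp).2.map (·.2), (pvTokP exp).2.map (·.1)) := by
  have := pvTok_fold exp [] [] []
  simp only [pvTok]
  rw [this]
  simp

theorem pvTokP_first (exp : List Char) : ∀ c ∈ (pvTokP exp).1, pvOp c = false := by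
  induction exp with
  | nil => simp [pvTokP]
  | cons c rest ih =>
    by_cases hc : pvOp c
    · simp [pvTokP, hc]
    · simp only [pvTokP, hc]
      intro d hd
      rcases List.mem_cons.mp hd with rfl | hd
      · simpa using hc
      · exact ih d hd

theorem pvTokP_pairs (exp : List Char) :
    ∀ p ∈ (pvTokP exp).2, pvOp p.1 = true ∧ ∀ c ∈ p.2, pvOp c = false := by
  induction exp with
  | nil => simp [pvTokP]
  | cons c rest ih =>
    by_cases hc : pvOp c
    · simp only [pvTokP, hc, if_true]
      intro p hp
      rcases List.mem_cons.mp hp with rfl | hp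
      · exact ⟨hc, pvTokP_first rest⟩
      · exact ih p hp
    · simp only [pvTokP, hc]
      exact ih

theorem pvTokP_join (exp : List Char) :
    (pvTokP exp).1 ++ (pvTokP exp).2.flatMap (fun p => p.1 :: p.2) = exp := by
  induction exp with
  | nil => simp [pvTokP]
  | cons c rest ih =>
    by_cases hc : pvOp c
    · simp only [pvTokP, hc, if_true, List.flatMap_cons]
      simp only [List.nil_append, List.cons_append]
      rw [ih]
    · simp only [pvTokP, hc, Bool.false_eq_true, if_false, List.cons_append]
      rw [ih]

-- join algebra
theorem pvTail_cons (segs : List (List Char)) (ops : List Char) (k hi : Nat) (h : k < hi) :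
    pvTail segs ops k hi = ops.getD k ' ' :: (segs.getD (k+1) [] ++ pvTail segs ops (k+1) hi) := by
  have e : hi - k = (hi - (k+1)) + 1 := by omega
  rw [pvTail, e, List.range'_succ, List.flatMap_cons, pvTail, List.cons_append]

theorem pvJoin_snoc (segs : List (List Char)) (ops : List Char) (lo k : Nat) (h : lo ≤ k) :
    pvJoin segs ops lo (k+1) = pvJoin segs ops lo k ++ ops.getD k ' ' :: segs.getD (k+1) [] := by
  have e : k + 1 - lo = (k - lo) + 1 := by omega
  have e2 : List.range' lo ((k - lo) + 1) = List.range' lo (k - lo) ++ [k] := by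
    rw [← List.range'_append]
    congr 1
    rw [List.range'_one]
    congr 1
    omega
  rw [pvJoin, pvJoin, pvTail, pvTail, e, e2, List.flatMap_append, List.flatMap_cons,
      List.flatMap_nil, List.append_nil, List.append_assoc]

theorem pvJoin_self (segs : List (List Char)) (ops : List Char) (lo : Nat) :
    pvJoin segs ops lo lo = segs.getD lo [] := by
  rw [pvJoin, pvTail]
  simp

theorem pvTail_full : ∀ (ps : List (Char × List Char)) (s : List Char) (k : Nat), k ≤ ps.length →
    pvTail (s :: ps.map (·.2)) (ps.map (·.1)) k ps.length =
      (ps.drop k).flatMap (fun p => p.1 :: p.2) := by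
  intro ps s
  suffices H : ∀ d k, k + d = ps.length →
      pvTail (s :: ps.map (·.2)) (ps.map (·.1)) k ps.length =
        (ps.drop k).flatMap (fun p => p.1 :: p.2) by
    intro k hk; exact H (ps.length - k) k (by omega)
  intro d
  induction d with
  | zero =>
    intro k hk
    have : k = ps.length := by omega
    subst this
    rw [pvTail]
    simp
  | succ d ihd =>
    intro k hk
    have hklt : k < ps.length := by omega
    rw [pvTail_cons _ _ _ _ hklt]
    have h1 : (ps.map (·.1)).getD k ' ' = (ps[k]'hklt).1 := by
      rw [List.getD_eq_getElem _ _ (by simpa), List.getElem_map]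
    have h2 : (s :: ps.map (·.2)).getD (k+1) [] = (ps[k]'hklt).2 := by
      rw [List.getD_cons_succ, List.getD_eq_getElem _ _ (by simpa), List.getElem_map]
    rw [h1, h2, ihd (k+1) (by omega), List.drop_eq_getElem_cons hklt, List.flatMap_cons,
        List.cons_append]

-- the scanning loop over a joined range, as a flatMap over the operator indices
theorem pvTL (segs : List (List Char)) (ops : List Char)
    (Hop : ∀ j < ops.length, pvOp (ops.getD j ' ') = true)
    (Hseg : ∀ i, ∀ c ∈ segs.getD i [], pvOp c = false) :
    ∀ d lo k, lo ≤ k → k + d ≤ ops.length →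
    pvL (pvJoin segs ops lo k) (pvTail segs ops k (k+d)) =
      (List.range' k d).flatMap (fun j =>
        pvCombA (ops.getD j ' ') (pvWW (pvJoin segs ops lo j)) (pvWW (pvJoin segs ops (j+1) (k+d)))) := by
  intro d
  induction d with
  | zero =>
    intro lo k _ _
    rw [pvTail]
    simp [pvL]
  | succ d ihd =>
    intro lo k hlk hkd
    rw [pvTail_cons _ _ _ _ (by omega), pvL, if_pos (Hop k (by omega))]
    have hrest : segs.getD (k+1) [] ++ pvTail segs ops (k+1) (k + (d+1)) = pvJoin segs ops (k+1) (k+(d+1)) := rfl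
    rw [hrest]
    have happ : pvL (pvJoin segs ops lo k ++ [ops.getD k ' ']) (pvJoin segs ops (k+1) (k+(d+1))) =
        pvL (pvJoin segs ops lo (k+1)) (pvTail segs ops (k+1) (k+(d+1))) := by
      show pvL (pvJoin segs ops lo k ++ [ops.getD k ' '])
          (segs.getD (k+1) [] ++ pvTail segs ops (k+1) (k+(d+1))) = _
      rw [pvL_append _ _ _ (Hseg (k+1))]
      congr 1
      rw [pvJoin_snoc _ _ _ _ hlk]
      simp
    rw [happ]
    have e : k + (d + 1) = (k+1) + d := by omega
    rw [e, ihd lo (k+1) (by omega) (by omega)]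
    rw [List.range'_succ, List.flatMap_cons]

-- main range lemma: the pure A-recursion on a joined range is B's solve
theorem pvM (segs : List (List Char)) (ops : List Char)
    (Hop : ∀ j < ops.length, pvOp (ops.getD j ' ') = true)
    (Hseg : ∀ i, ∀ c ∈ segs.getD i [], pvOp c = false) :
    ∀ d, ∀ f lo, lo + d ≤ ops.length → d < f →
    pvWW (pvJoin segs ops lo (lo+d)) = pvSolveB segs ops f lo (lo+d) := by
  intro d
  induction d using Nat.strong_induction_on with
  | _ d ihd =>
    intro f lo hle hdf
    cases f with
    | zero => omega
    | succ f =>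
      cases d with
      | zero =>
        rw [Nat.add_zero, pvJoin_self, pvSolveB, if_pos rfl]
        by_cases hdig : PySem.Chars.strIsdigit (segs.getD lo [])
        · rw [if_pos hdig, pvWW_unfold, if_pos hdig]
        · rw [if_neg hdig, pvWW_eq_pvL _ (by simpa using hdig)]
          exact pvL_nil_of_no_op _ _ (Hseg lo)
      | succ d =>
        have hlo : lo < ops.length := by omega
        have hdig : PySem.Chars.strIsdigit (pvJoin segs ops lo (lo + (d+1))) = false := by
          apply isdigit_false_of_op _ (ops.getD lo ' ') _ (Hop lo hlo)
          rw [pvJoin, pvTail_cons _ _ _ _ (by omega)]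
          simp
        rw [pvWW_eq_pvL _ hdig]
        have h0 : pvL [] (pvJoin segs ops lo (lo + (d+1))) =
            pvL (pvJoin segs ops lo lo) (pvTail segs ops lo (lo + (d+1))) := by
          rw [pvJoin_self, pvJoin]
          rw [pvL_append (segs.getD lo []) [] _ (Hseg lo)]
          simp
        have e : lo + (d+1) = lo + (d+1) := rfl
        rw [h0]
        have htl := pvTL segs ops Hop Hseg (d+1) lo lo (le_refl lo) (by omega)
        rw [htl]
        rw [pvSolveB, if_neg (by omega)]
        have hrange : lo + (d+1) - lo = d + 1 := by omega
        rw [hrange]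
        refine List.flatMap_congr ?_
        intro j hj
        rw [List.mem_range'_1] at hj
        have hcomb : pvCombB = pvCombA := rfl
        rw [hcomb]
        congr 1
        · have e1 : j = lo + (j - lo) := by omega
          rw [e1, ihd (j - lo) (by omega) f lo (by omega) (by omega)]
        · have e2 : lo + (d+1) = (j+1) + (lo + d - j) := by omega
          rw [e2, ihd (lo + d - j) (by omega) f (j+1) (by omega) (by omega)]

-- ===== VERDICT (by name: the statement is the Claim_ definition above) =====
theorem diffWaysToCompute_spec : Claim_equal_diffWaysToCompute := by
  unfold Claim_equal_diffWaysToCompute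
  intro expression _hdom
  unfold Spec_diffWaysToCompute
  unfold diffWaysToCompute diffWaysToCompute_alt
  have hA : (pvWaysA (expression.toList.length + 1) expression.toList PySem.Dict.empty).1 =
      pvWW expression.toList :=
    (pvWaysA_correct _ _ _ (by omega)
      (fun k v h => by rw [PySem.Dict.get?_empty] at h; cases h)).1
  rw [hA]
  rw [pvTok_eq]
  set l := expression.toList with hl
  set s := (pvTokP l).1 with hs
  set ps := (pvTokP l).2 with hps
  have Hop : ∀ j < (ps.map (·.1)).length, pvOp ((ps.map (·.1)).getD j ' ') = true := by
    intro j hj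
    rw [List.length_map] at hj
    rw [List.getD_eq_getElem _ _ (by simpa), List.getElem_map]
    exact (pvTokP_pairs l _ (List.getElem_mem hj)).1
  have Hseg : ∀ i, ∀ c ∈ (s :: ps.map (·.2)).getD i [], pvOp c = false := by
    intro i c hc
    cases i with
    | zero => exact pvTokP_first l c hc
    | succ i =>
      rw [List.getD_cons_succ] at hc
      by_cases hi : i < ps.length
      · rw [List.getD_eq_getElem _ _ (by simpa), List.getElem_map] at hc
        exact (pvTokP_pairs l _ (List.getElem_mem hi)).2 c hc
      · rw [List.getD_eq_default _ _ (by simpa using hi)] at hc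
        cases hc
  have hjoin : pvJoin (s :: ps.map (·.2)) (ps.map (·.1)) 0 ps.length = l := by
    rw [pvJoin, pvTail_full ps s 0 (by omega), List.drop_zero]
    have : (s :: ps.map (·.2)).getD 0 [] = s := rfl
    rw [this]
    exact pvTokP_join l
  have hM := pvM (s :: ps.map (·.2)) (ps.map (·.1)) Hop Hseg ps.length (ps.length + 1) 0
    (by simp) (by omega)
  rw [Nat.zero_add] at hM
  rw [hjoin] at hM
  simp only [List.length_map]
  exact hM
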